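-- pv_equiv track=rewrite | github.com/VarshaShetty28/07-25_Training_pgms | Empty_an_array.py | empty_array_steps
-- ===== SOURCE A (Python) =====
-- def empty_array_steps(arr):
--     steps = 0
--     while arr:
--         smallest = min(arr)
--         if arr[0] == smallest:
--             arr.pop(0)
--         else:
--             arr.append(arr.pop(0))
--         steps += 1
--     return steps
-- ===== SOURCE B (Python) =====
-- def empty_array_steps(arr):
--     # Return value only: A empties arr in place; B leaves arr untouched.
--     a = list(arr)
--     steps = 0
--     while a:
--         i = a.index(min(a))
--         steps += i + 1
--         a = a[i + 1:] + a[:i]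
--     return steps
-- ===== Notes on version B (the rewrite author's own statement) =====
-- stated objective: faster
-- what changed: Instead of rotating the array one element per step, B finds the first minimum's index and jumps there in one bulk step (steps += i+1, list resliced), cutting the number of loop iterations from the total step count to n.
import Mathlib
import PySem

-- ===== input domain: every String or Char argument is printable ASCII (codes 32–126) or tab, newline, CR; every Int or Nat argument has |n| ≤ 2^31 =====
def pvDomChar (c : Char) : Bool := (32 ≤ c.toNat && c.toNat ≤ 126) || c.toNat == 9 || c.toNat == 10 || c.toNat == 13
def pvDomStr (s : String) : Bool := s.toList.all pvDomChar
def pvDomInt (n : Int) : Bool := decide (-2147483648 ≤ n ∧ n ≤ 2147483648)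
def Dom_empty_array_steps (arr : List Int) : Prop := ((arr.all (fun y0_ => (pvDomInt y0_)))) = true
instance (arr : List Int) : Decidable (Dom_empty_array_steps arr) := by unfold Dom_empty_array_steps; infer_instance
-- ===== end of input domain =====

-- B rotates straight to the first minimum in one bulk step (index + slicing) instead of
-- A's one-element-at-a-time rotations: same return value, asymptotically fewer iterations.
-- Equivalence is about the RETURN value only: A empties its argument in place, B does not mutate it.

-- ===== PORT A =====

-- Python's `min` on a nonempty int list: the minimum value (exact; ties all carry the same value).
def pyMin (a : Int) (rest : List Int) : Int := rest.foldl min a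

-- index of the first minimum (0 for []); used only as A's termination measure
def mIdx (l : List Int) : Nat :=
  match l with
  | [] => 0
  | a :: rest => List.idxOf (pyMin a rest) (a :: rest)

theorem pyMin_mem (a : Int) (rest : List Int) : pyMin a rest ∈ a :: rest := by
  induction rest generalizing a with
  | nil => simp [pyMin]
  | cons b r ih =>
    have h := ih (min a b)
    simp only [pyMin, List.foldl_cons] at h ⊢
    rw [List.mem_cons] at h
    rw [List.mem_cons, List.mem_cons]
    rcases h with h | h
    · rcases le_total a b with hab | hab
      · exact Or.inl (by rw [h, min_eq_left hab])
      · exact Or.inr (Or.inl (by rw [h, min_eq_right hab]))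
    · exact Or.inr (Or.inr h)

theorem pyMin_le (a : Int) (rest : List Int) : ∀ x ∈ a :: rest, pyMin a rest ≤ x := by
  induction rest generalizing a with
  | nil => simp [pyMin]
  | cons b r ih =>
    intro x hx
    simp only [pyMin, List.foldl_cons]
    have hmab : List.foldl min (min a b) r ≤ min a b := ih (min a b) (min a b) (by simp)
    rw [List.mem_cons, List.mem_cons] at hx
    rcases hx with hx | hx | hx
    · subst hx; exact le_trans hmab (min_le_left _ _)
    · subst hx; exact le_trans hmab (min_le_right _ _)
    · exact ih (min a b) x (by simp [hx])

theorem pyMin_mem_tail (a : Int) (rest : List Int) (h : a ≠ pyMin a rest) :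
    pyMin a rest ∈ rest := by
  have hm := pyMin_mem a rest
  rw [List.mem_cons] at hm
  rcases hm with hm | hm
  · exact absurd hm.symm h
  · exact hm

theorem pyMin_congr (a b : Int) (l l' : List Int)
    (h : ∀ x, x ∈ a :: l ↔ x ∈ b :: l') : pyMin a l = pyMin b l' := by
  apply le_antisymm
  · exact pyMin_le a l _ ((h _).mpr (pyMin_mem b l'))
  · exact pyMin_le b l' _ ((h _).mp (pyMin_mem a l))

theorem mIdx_rot (a b : Int) (r : List Int) (hne : a ≠ pyMin a (b :: r))
    (hm : pyMin a (b :: r) ∈ b :: r) :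
    mIdx ((b :: r) ++ [a]) < mIdx (a :: b :: r) := by
  have hmin : pyMin b (r ++ [a]) = pyMin a (b :: r) := by
    apply pyMin_congr; intro x; simp; tauto
  simp only [mIdx, List.cons_append, hmin]
  rw [show b :: (r ++ [a]) = (b :: r) ++ [a] from rfl, List.idxOf_append_of_mem hm,
    List.idxOf_cons_ne _ hne]
  exact Nat.lt_succ_self _

def emptyGo (arr : List Int) (steps : Int) : Int :=
  match arr with
  | [] => steps
  | a :: rest =>
    -- smallest = min(arr)
    if a = pyMin a rest then
      emptyGo rest (steps + 1)            -- arr.pop(0); steps += 1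
    else
      emptyGo (rest ++ [a]) (steps + 1)   -- arr.append(arr.pop(0)); steps += 1
termination_by (arr.length, mIdx arr)
decreasing_by
  · exact Prod.Lex.left _ _ (by simp)
  · rename_i hne
    have hm : pyMin a rest ∈ rest := pyMin_mem_tail a rest hne
    rcases rest with _ | ⟨b, r⟩
    · simp at hm
    · simp only [List.length_append, List.length_cons, List.length_nil]
      exact Prod.Lex.right _ (mIdx_rot a b r hne hm)

def empty_array_steps (arr : List Int) : Int := emptyGo arr 0

-- ===== PORT B =====

def emptyAltGo (a : List Int) (steps : Int) : Int :=
  match a with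
  | [] => steps
  | x :: r =>
    let i := List.idxOf (pyMin x r) (x :: r)   -- i = a.index(min(a)) (min exists, so found)
    emptyAltGo ((x :: r).drop (i + 1) ++ (x :: r).take i) (steps + (i : Int) + 1)
termination_by a.length
decreasing_by
  have hlt : List.idxOf (pyMin x r) (x :: r) < (x :: r).length :=
    List.idxOf_lt_length_of_mem (pyMin_mem x r)
  simp only [List.length_append, List.length_drop, List.length_take]
  simp at hlt ⊢
  omega

def empty_array_steps_alt (arr : List Int) : Int := emptyAltGo arr 0

-- ===== PRECONDITION & SPEC =====
def Spec_empty_array_steps (arr : List Int) (out : Int) : Prop := out = empty_array_steps_alt arr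
instance (arr : List Int) (out : Int) : Decidable (Spec_empty_array_steps arr out) := by unfold Spec_empty_array_steps; infer_instance

-- ===== CLAIM (what is proved, stated in full; the proofs are below) =====
def Claim_equal_empty_array_steps : Prop := ∀ (arr : List Int), Dom_empty_array_steps arr → Spec_empty_array_steps arr (empty_array_steps arr)

-- ===== LEMMAS AND PROOFS =====

-- B's bulk step agrees with A's single step: popping a minimal head is one B-step with i = 0,
-- and rotating a non-minimal head costs B one unit of the same bulk count.
theorem altGo_pop (a : Int) (rest : List Int) (steps : Int) (h : a = pyMin a rest) :
    emptyAltGo (a :: rest) steps = emptyAltGo rest (steps + 1) := by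
  rw [emptyAltGo]
  simp [← h, List.idxOf_cons_self]

theorem altGo_rot (a b : Int) (r : List Int) (steps : Int) (h : a ≠ pyMin a (b :: r)) :
    emptyAltGo (a :: b :: r) steps = emptyAltGo ((b :: r) ++ [a]) (steps + 1) := by
  have hm : pyMin a (b :: r) ∈ b :: r := pyMin_mem_tail a (b :: r) h
  have hmin : pyMin b (r ++ [a]) = pyMin a (b :: r) := by
    apply pyMin_congr; intro x; simp; tauto
  set m := pyMin a (b :: r) with hmdef
  have hj : List.idxOf m ((b :: r) ++ [a]) = List.idxOf m (b :: r) :=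
    List.idxOf_append_of_mem hm
  have hi : List.idxOf m (a :: b :: r) = List.idxOf m (b :: r) + 1 :=
    List.idxOf_cons_ne _ h
  set j := List.idxOf m (b :: r) with hjdef
  have hjlt : j < (b :: r).length := List.idxOf_lt_length_of_mem hm
  rw [emptyAltGo]
  conv_rhs => rw [show (b :: r) ++ [a] = b :: (r ++ [a]) from rfl, emptyAltGo]
  rw [show b :: (r ++ [a]) = (b :: r) ++ [a] from rfl]
  simp only [hmin, ← hmdef, hi, hj]
  have hdrop : ((b :: r) ++ [a]).drop (j + 1) = (b :: r).drop (j + 1) ++ [a] :=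
    List.drop_append_of_le_length (by omega)
  have htake : ((b :: r) ++ [a]).take j = (b :: r).take j :=
    List.take_append_of_le_length (by omega)
  have hdrop2 : (a :: b :: r).drop (j + 1 + 1) = (b :: r).drop (j + 1) := rfl
  have htake2 : (a :: b :: r).take (j + 1) = a :: (b :: r).take j := rfl
  rw [hdrop, htake, hdrop2, htake2]
  have hlist : (b :: r).drop (j + 1) ++ [a] ++ (b :: r).take j
      = (b :: r).drop (j + 1) ++ (a :: (b :: r).take j) := by
    simp
  rw [hlist]
  congr 1
  push_cast
  ring

theorem go_eq (arr : List Int) (steps : Int) : emptyGo arr steps = emptyAltGo arr steps := by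
  fun_induction emptyGo arr steps with
  | case1 steps => simp [emptyAltGo]
  | case2 steps a rest h ih =>
    rw [ih, altGo_pop a rest steps h]
  | case3 steps a rest h ih =>
    rcases rest with _ | ⟨b, r⟩
    · exact absurd (by simp [pyMin]) h
    · rw [ih, altGo_rot a b r steps h]

-- ===== VERDICT (by name: the statement is the Claim_ definition above) =====
theorem empty_array_steps_spec : Claim_equal_empty_array_steps := by
  intro arr _
  unfold Spec_empty_array_steps empty_array_steps empty_array_steps_alt
  exact go_eq arr 0
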